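-- pv_equiv track=rewrite | github.com/SamuelLarkin/AdventOfCode2022 | day16/solution2.py | expected_future_score
-- ===== SOURCE A (Python) =====
-- def expected_future_score(
--         visited_valves,
--         ordered_valves,
--         remaining_minutes: int,
--         ) -> int:
--     """
--     """
--     remaining_valves = {k: v for k, v in ordered_valves.items() if k not in visited_valves}
--     flow_minutes = zip(remaining_valves.values(), range(remaining_minutes, 0, -2))
--     future_score = sum(flow*minutes for flow, minutes in flow_minutes)
--
--     return future_score
-- ===== SOURCE B (Python) =====
-- def expected_future_score(
--         visited_valves,
--         ordered_valves,
--         remaining_minutes: int,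
--         ) -> int:
--     """Closed-form reformulation: the i-th kept valve gets remaining_minutes - 2*i
--     minutes, and only the first k = ceil(remaining_minutes/2) terms are positive,
--     so the sum equals m*sum(flows) - 2*sum(i*flow_i) over the first k unvisited flows."""
--     k = max(0, (remaining_minutes + 1) // 2)
--     flows = [f for v, f in ordered_valves.items() if v not in visited_valves][:k]
--     return remaining_minutes * sum(flows) - 2 * sum(i * f for i, f in enumerate(flows))
-- ===== Notes on version B (the rewrite author's own statement) =====
-- stated objective: alternative
-- what changed: Replaces the zip-with-decreasing-range and per-term flow*minutes products by a closed-form arithmetic identity: truncate the unvisited flows to k = max(0, ceil(m/2)) items and return m*sum(flows) - 2*sum(i*flow_i), so no minute countdown sequence is ever built or paired.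
import Mathlib
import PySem

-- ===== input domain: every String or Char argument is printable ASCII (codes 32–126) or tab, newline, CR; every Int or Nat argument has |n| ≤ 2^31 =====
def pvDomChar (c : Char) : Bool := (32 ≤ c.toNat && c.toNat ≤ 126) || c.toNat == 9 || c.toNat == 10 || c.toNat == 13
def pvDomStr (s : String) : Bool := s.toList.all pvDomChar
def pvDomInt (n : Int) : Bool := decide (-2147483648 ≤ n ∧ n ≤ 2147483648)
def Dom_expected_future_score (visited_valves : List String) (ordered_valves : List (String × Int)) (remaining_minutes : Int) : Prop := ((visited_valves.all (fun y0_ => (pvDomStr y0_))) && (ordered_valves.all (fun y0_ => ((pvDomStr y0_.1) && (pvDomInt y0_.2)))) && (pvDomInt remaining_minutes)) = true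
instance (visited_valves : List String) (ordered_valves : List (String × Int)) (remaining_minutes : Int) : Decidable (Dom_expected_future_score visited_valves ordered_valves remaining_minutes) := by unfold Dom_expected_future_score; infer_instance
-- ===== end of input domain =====

-- A zips the filtered flows with the countdown range and sums the products;
-- B uses the closed-form m*sum(flows) - 2*sum(i*flow_i) over the first k flows. Return-value equivalence.
-- ===== PORT A =====
def expected_future_score (visited_valves : List String) (ordered_valves : List (String × Int)) (remaining_minutes : Int) : Int :=
  let remaining_valves := ordered_valves.filter (fun kv => !(visited_valves.contains kv.1))
  let flow_minutes := (remaining_valves.map Prod.snd).zip (PySem.List.pyRange remaining_minutes 0 (-2))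
  let future_score := (flow_minutes.map (fun p => p.1 * p.2)).sum
  future_score

-- ===== PORT B =====
def expected_future_score_alt (visited_valves : List String) (ordered_valves : List (String × Int)) (remaining_minutes : Int) : Int :=
  let k := max 0 (PySem.Int.floordiv (remaining_minutes + 1) 2)
  let flows := PySem.List.slice ((ordered_valves.filter (fun kv => !(visited_valves.contains kv.1))).map Prod.snd) none (some k)
  remaining_minutes * flows.sum - 2 * ((PySem.List.enumerate flows).map (fun p => p.1 * p.2)).sum

-- ===== PRECONDITION & SPEC =====
def Spec_expected_future_score (visited_valves : List String) (ordered_valves : List (String × Int)) (remaining_minutes : Int) (out : Int) : Prop := out = expected_future_score_alt visited_valves ordered_valves remaining_minutes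
instance (visited_valves : List String) (ordered_valves : List (String × Int)) (remaining_minutes : Int) (out : Int) : Decidable (Spec_expected_future_score visited_valves ordered_valves remaining_minutes out) := by unfold Spec_expected_future_score; infer_instance

-- ===== CLAIM (what is proved, stated in full; the proofs are below) =====
def Claim_equal_expected_future_score : Prop := ∀ (visited_valves : List String) (ordered_valves : List (String × Int)) (remaining_minutes : Int), Dom_expected_future_score visited_valves ordered_valves remaining_minutes → Spec_expected_future_score visited_valves ordered_valves remaining_minutes (expected_future_score visited_valves ordered_valves remaining_minutes)

-- ===== LEMMAS AND PROOFS =====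

theorem pyRange_step2_nil (m : Int) (h : m ≤ 0) : PySem.List.pyRange m 0 (-2) = [] := by
  simp only [PySem.List.pyRange]
  norm_num
  omega

theorem pyRange_step2_cons (m : Int) (h : 0 < m) :
    PySem.List.pyRange m 0 (-2) = m :: PySem.List.pyRange (m - 2) 0 (-2) := by
  simp only [PySem.List.pyRange]
  norm_num
  rw [if_pos h]
  by_cases h2 : 2 < m
  · rw [if_pos h2]
    have hn : ((m + 2 - 1) / 2).toNat = ((m - 1) / 2).toNat + 1 := by omega
    rw [hn, List.range_succ_eq_map, List.map_cons, List.map_map, List.cons.injEq]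
    refine ⟨by norm_num, ?_⟩
    · apply List.map_congr_left
      intro k _
      simp only [Function.comp_apply]
      push_cast
      ring
  · rw [if_neg h2]
    have hm : m = 1 ∨ m = 2 := by omega
    rcases hm with hm | hm <;> subst hm <;> decide

-- Shifting the enumerate start adds the list sum once.
theorem enumerate_mul_sum_shift (xs : List Int) (s : Int) :
    ((PySem.List.enumerate xs (s + 1)).map (fun p => p.1 * p.2)).sum =
      xs.sum + ((PySem.List.enumerate xs s).map (fun p => p.1 * p.2)).sum := by
  induction xs generalizing s with
  | nil => simp [PySem.List.enumerate_nil]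
  | cons x xs ih =>
    rw [PySem.List.enumerate_cons, PySem.List.enumerate_cons]
    simp only [List.map_cons, List.sum_cons, ih (s + 1)]
    ring

-- The zipped countdown sum equals the closed form over the first k flows.
theorem zip_countdown_closed_form (L : List Int) (m : Int) :
    ((L.zip (PySem.List.pyRange m 0 (-2))).map (fun p => p.1 * p.2)).sum =
      m * (L.take (max 0 (PySem.Int.floordiv (m + 1) 2)).toNat).sum -
        2 * ((PySem.List.enumerate (L.take (max 0 (PySem.Int.floordiv (m + 1) 2)).toNat)).map (fun p => p.1 * p.2)).sum := by
  induction L generalizing m with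
  | nil => simp
  | cons f rest ih =>
    by_cases hm : m ≤ 0
    · rw [pyRange_step2_nil m hm]
      have hk : (max 0 (PySem.Int.floordiv (m + 1) 2)).toNat = 0 := by
        rw [PySem.Int.floordiv_eq_ediv_of_pos (by omega)]
        omega
      rw [hk]
      simp
    · rw [pyRange_step2_cons m (by omega)]
      have hk : (max 0 (PySem.Int.floordiv (m + 1) 2)).toNat =
          (max 0 (PySem.Int.floordiv (m - 2 + 1) 2)).toNat + 1 := by
        rw [PySem.Int.floordiv_eq_ediv_of_pos (by omega),
            PySem.Int.floordiv_eq_ediv_of_pos (by omega)]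
        omega
      rw [hk]
      simp only [List.zip_cons_cons, List.map_cons, List.sum_cons, ih (m - 2),
        List.take_succ_cons, PySem.List.enumerate_cons]
      rw [enumerate_mul_sum_shift]
      ring

-- ===== VERDICT (by name: the statement is the Claim_ definition above) =====
theorem expected_future_score_spec : Claim_equal_expected_future_score := by
  intro vv ov m _
  show expected_future_score vv ov m = expected_future_score_alt vv ov m
  simp only [expected_future_score, expected_future_score_alt]
  rw [PySem.List.slice_to _ (le_max_left 0 _), zip_countdown_closed_form]
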